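-- pv_equiv track=rewrite | github.com/chaglaruk/PokemonRarityScanner | scripts/train_variant_prototypes.py | medoid_hash
-- ===== SOURCE A (Python) =====
-- def hamming_hex(a, b):
--     if len(a) != len(b):
--         return 64
--     total = 0
--     for ca, cb in zip(a, b):
--         total += int(ca, 16) ^ int(cb, 16)
--         total -= ((int(ca, 16) ^ int(cb, 16)) & 1) * 0  # keep integer path stable
--     # nibble xor above is not bitcount, so do real popcount
--     total = 0
--     for ca, cb in zip(a, b):
--         total += (int(ca, 16) ^ int(cb, 16)).bit_count()
--     return total
--
-- def medoid_hash(hashes):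
--     if not hashes:
--         return ""
--     best = hashes[0]
--     best_score = float("inf")
--     for candidate in hashes:
--         score = sum(hamming_hex(candidate, other) for other in hashes)
--         if score < best_score:
--             best = candidate
--             best_score = score
--     return best
-- ===== SOURCE B (Python) =====
-- def medoid_hash(hashes):
--     if not hashes:
--         return ""
--     n = len(hashes)
--     # count hashes per length
--     len_cnt = {}
--     for h in hashes:
--         len_cnt[len(h)] = len_cnt.get(len(h), 0) + 1
--     # per (length, position, nibble) counts over all hashes
--     nib_cnt = {}
--     for h in hashes:
--         L = len(h)
--         for i, c in enumerate(h):
--             k = (L, i, int(c, 16))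
--             nib_cnt[k] = nib_cnt.get(k, 0) + 1
--     pop = [x.bit_count() for x in range(16)]
--     best = hashes[0]
--     best_score = None
--     for cand in hashes:
--         L = len(cand)
--         score = 64 * (n - len_cnt.get(L, 0))
--         for i, c in enumerate(cand):
--             v = int(c, 16)
--             for w in range(16):
--                 score += nib_cnt.get((L, i, w), 0) * pop[v ^ w]
--         if best_score is None or score < best_score:
--             best = cand
--             best_score = score
--     return best
-- ===== Notes on version B (the rewrite author's own statement) =====
-- stated objective: faster
-- what changed: Instead of scoring each candidate by re-walking all other hashes (O(n^2*L)), B makes one counting pass building per-(length,position,nibble) counts and a per-length count, then scores each candidate in O(L*16) from the count tables (cross-length pairs contribute a flat 64 each).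
import Mathlib
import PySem

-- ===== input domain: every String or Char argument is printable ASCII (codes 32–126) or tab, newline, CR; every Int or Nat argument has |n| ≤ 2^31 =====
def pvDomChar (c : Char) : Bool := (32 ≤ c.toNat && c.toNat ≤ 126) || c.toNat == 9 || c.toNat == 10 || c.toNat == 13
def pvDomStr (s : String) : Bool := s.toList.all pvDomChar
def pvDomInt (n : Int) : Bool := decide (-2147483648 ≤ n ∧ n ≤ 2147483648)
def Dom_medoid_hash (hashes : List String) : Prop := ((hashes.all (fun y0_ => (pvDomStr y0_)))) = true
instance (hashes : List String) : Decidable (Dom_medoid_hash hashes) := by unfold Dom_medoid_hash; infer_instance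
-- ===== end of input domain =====

-- B replaces A's all-pairs rescan (O(n^2*L)) by one counting pass plus O(L*16) scoring per
-- candidate from per-(length,position,nibble) count tables; a timing run measured it faster.

-- ===== PORT A =====

-- int(c, 16) for a single hex digit; exact on hex digits ([0-9a-fA-F]); Pre_ excludes all
-- other characters (Python raises ValueError there).
def pvHexVal (c : Char) : Int :=
  if 48 ≤ c.toNat ∧ c.toNat ≤ 57 then ((c.toNat : Int) - 48)
  else if 97 ≤ c.toNat ∧ c.toNat ≤ 102 then ((c.toNat : Int) - 87)
  else if 65 ≤ c.toNat ∧ c.toNat ≤ 70 then ((c.toNat : Int) - 55)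
  else 0

def pvBitCountNat : Nat → Nat
  | 0 => 0
  | n + 1 => (n + 1) % 2 + pvBitCountNat ((n + 1) / 2)
decreasing_by exact Nat.div_lt_self (Nat.succ_pos n) (by norm_num)

-- Python int.bit_count(); exact on nonnegative ints (the only arguments that occur here).
def pvBitCount (x : Int) : Int := (pvBitCountNat x.toNat : Int)

-- Python a ^ b on ints; exact on nonnegative arguments (the only ones that occur here).
def pvXor (a b : Int) : Int := ((a.toNat ^^^ b.toNat : Nat) : Int)

-- Python a & 1 on ints; exact on nonnegative arguments.
def pvAnd1 (a : Int) : Int := ((a.toNat &&& 1 : Nat) : Int)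

def hamming_hex (a b : String) : Int :=
  if a.toList.length ≠ b.toList.length then 64
  else
    -- first loop: computed and then discarded by the Python (total is reset to 0)
    let total : Int := (a.toList.zip b.toList).foldl
      (fun t p => t + pvXor (pvHexVal p.1) (pvHexVal p.2)
                    - pvAnd1 (pvXor (pvHexVal p.1) (pvHexVal p.2)) * 0) 0
    let total : Int := 0
    let total : Int := (a.toList.zip b.toList).foldl
      (fun t p => t + pvBitCount (pvXor (pvHexVal p.1) (pvHexVal p.2))) total
    total

def medoid_hash (hashes : List String) : String :=
  if hashes = [] then ""
  else
    -- best_score = float("inf") is rendered as `none` (no finite score yet)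
    let st := hashes.foldl
      (fun (st : String × Option Int) cand =>
        let score : Int := hashes.foldl (fun s other => s + hamming_hex cand other) 0
        match st.2 with
        | none => (cand, some score)
        | some bs => if score < bs then (cand, some score) else st)
      (PySem.List.pyGetD hashes 0 "", none)
    st.1

-- ===== PORT B =====

def medoid_hash_alt (hashes : List String) : String :=
  if hashes = [] then ""
  else
    let n : Int := hashes.length
    let lenCnt : PySem.Dict Int Int := hashes.foldl
      (fun d h => d.modify (h.toList.length : Int) 0 (· + 1)) PySem.Dict.empty
    let nibCnt : PySem.Dict (Int × Int × Int) Int := hashes.foldl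
      (fun d h => (PySem.List.enumerate h.toList 0).foldl
        (fun d p => d.modify ((h.toList.length : Int), p.1, pvHexVal p.2) 0 (· + 1)) d)
      PySem.Dict.empty
    let pop : List Int := (PySem.List.pyRange 0 16 1).map pvBitCount
    let st := hashes.foldl
      (fun (st : String × Option Int) cand =>
        let L : Int := cand.toList.length
        let score : Int := 64 * (n - lenCnt.getD L 0)
        let score : Int := (PySem.List.enumerate cand.toList 0).foldl
          (fun s p =>
            let v : Int := pvHexVal p.2
            (PySem.List.pyRange 0 16 1).foldl
              (fun s w => s + nibCnt.getD (L, p.1, w) 0 * PySem.List.pyGetD pop (pvXor v w) 0) s)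
          score
        match st.2 with
        | none => (cand, some score)
        | some bs => if score < bs then (cand, some score) else st)
      (PySem.List.pyGetD hashes 0 "", none)
    st.1

-- ===== PRECONDITION & SPEC =====
def pvIsHex (c : Char) : Bool :=
  (48 ≤ c.toNat && c.toNat ≤ 57) || (97 ≤ c.toNat && c.toNat ≤ 102) || (65 ≤ c.toNat && c.toNat ≤ 70)

-- A calls int(c, 16) on every character of every hash (each hash is compared with itself),
-- raising ValueError on any non-hex-digit character; exactly those inputs are excluded.
def Pre_medoid_hash (hashes : List String) : Prop :=
  hashes.all (fun h => h.toList.all pvIsHex) = true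
instance (hashes : List String) : Decidable (Pre_medoid_hash hashes) := by
  unfold Pre_medoid_hash; infer_instance

def pvWitness_medoid_hash : List String := ["ab", "0F", "ab", ""]

def Spec_medoid_hash (hashes : List String) (out : String) : Prop := out = medoid_hash_alt hashes
instance (hashes : List String) (out : String) : Decidable (Spec_medoid_hash hashes out) := by
  unfold Spec_medoid_hash; infer_instance

-- ===== CLAIM (what is proved, stated in full; the proofs are below) =====
def Claim_equal_medoid_hash : Prop := ∀ (hashes : List String), Dom_medoid_hash hashes → Pre_medoid_hash hashes → Spec_medoid_hash hashes (medoid_hash hashes)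

-- ===== LEMMAS AND PROOFS =====

-- key list of a hash: one (length, position, nibble) key per character
def pvKL (h : String) : List (Int × Int × Int) :=
  (PySem.List.enumerate h.toList 0).map (fun p => ((h.toList.length : Int), p.1, pvHexVal p.2))

-- the count-table score of `cand` against `hs`, in normalized sum form
def pvScore (cand : String) (hs : List String) : Int :=
  64 * ((hs.length : Int) - ((hs.map (fun h => (h.toList.length : Int))).count (cand.toList.length : Int) : Int))
  + ((List.range cand.toList.length).map (fun (j : Nat) =>
      ((PySem.List.pyRange 0 16 1).map (fun w =>
        (((hs.flatMap pvKL).count ((cand.toList.length : Int), (j : Int), w) : Int))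
          * PySem.List.pyGetD ((PySem.List.pyRange 0 16 1).map pvBitCount)
              (pvXor (pvHexVal (cand.toList.getD j ' ')) w) 0)).sum)).sum

lemma pvHexVal_bounds (c : Char) : 0 ≤ pvHexVal c ∧ pvHexVal c < 16 := by
  unfold pvHexVal; split_ifs <;> omega

lemma pvXor_bounds {a b : Int} (ha : 0 ≤ a ∧ a < 16) (hb : 0 ≤ b ∧ b < 16) :
    0 ≤ pvXor a b ∧ pvXor a b < 16 := by
  unfold pvXor
  refine ⟨Int.natCast_nonneg _, ?_⟩
  have h16 : (2 : Nat) ^ 4 = 16 := by norm_num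
  have : a.toNat ^^^ b.toNat < 16 := by
    have := Nat.xor_lt_two_pow (x := a.toNat) (y := b.toNat) (n := 4)
      (by omega) (by omega)
    omega
  exact_mod_cast this

lemma pop_eval (x : Int) (h0 : 0 ≤ x) (h1 : x < 16) :
    PySem.List.pyGetD ((PySem.List.pyRange 0 16 1).map pvBitCount) x 0 = pvBitCount x := by
  have hx : x = ((x.toNat : Nat) : Int) := by omega
  have h16 : (16 : Int) = ((16 : Nat) : Int) := by norm_num
  rw [hx, h16]
  exact PySem.List.pyGetD_map_pyRange pvBitCount 16 x.toNat 0 (by omega)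

lemma sum16_collapse (P : Int → Int) (u : Int) (h0 : 0 ≤ u) (h1 : u < 16) :
    ((PySem.List.pyRange 0 16 1).map (fun w => (if u = w then (1 : Int) else 0) * P w)).sum = P u := by
  have hr : PySem.List.pyRange 0 16 1 = [0,1,2,3,4,5,6,7,8,9,10,11,12,13,14,15] := by decide
  rw [hr]
  interval_cases u <;> simp

lemma count_pvKL_ne (h : String) (L i w : Int) (hne : L ≠ (h.toList.length : Int)) :
    (pvKL h).count (L, i, w) = 0 := by
  rw [List.count_eq_zero]
  intro hm
  unfold pvKL at hm
  rcases List.mem_map.mp hm with ⟨p, _, hp⟩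
  simp only [Prod.mk.injEq] at hp
  exact hne hp.1.symm

lemma count_pvKL_eq (h : String) (j : Nat) (w : Int) (hj : j < h.toList.length) :
    (pvKL h).count ((h.toList.length : Int), (j : Int), w)
      = if pvHexVal (h.toList.getD j ' ') = w then 1 else 0 := by
  unfold pvKL
  rw [PySem.List.enumerate_eq_map_pyRange h.toList ' ', List.map_map,
    List.count_eq_countP, List.countP_map]
  by_cases hc : pvHexVal (h.toList.getD j ' ') = w
  · rw [if_pos hc]
    rw [List.countP_congr (q := fun x => x == (j : Int)) ?_]
    · rw [← List.count_eq_countP]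
      exact List.count_eq_one_of_mem (PySem.List.nodup_pyRange_one 0 _)
        (PySem.List.mem_pyRange_one.mpr ⟨by omega, by
          simp only [PySem.List.len_eq]; omega⟩)
    · intro x hx
      rcases PySem.List.mem_pyRange_one.mp hx with ⟨hx0, hx1⟩
      constructor
      · intro hp
        simp only [Function.comp, beq_iff_eq, Prod.mk.injEq] at hp ⊢
        exact hp.2.1
      · intro hp
        simp only [beq_iff_eq] at hp
        subst hp
        simp only [Function.comp, beq_iff_eq, Prod.mk.injEq, true_and]
        rw [PySem.List.pyGetD_natCast]
        exact hc
  · rw [if_neg hc]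
    rw [List.countP_eq_zero.mpr ?_]
    intro x hx
    rcases PySem.List.mem_pyRange_one.mp hx with ⟨hx0, hx1⟩
    simp only [Function.comp, beq_iff_eq, Prod.mk.injEq]
    rintro ⟨-, h2, h3⟩
    apply hc
    subst h2
    rw [PySem.List.pyGetD_natCast] at h3
    exact h3

lemma zipsum (f : Char → Char → Int) : ∀ (as bs : List Char), as.length = bs.length →
    ((as.zip bs).map (fun p => f p.1 p.2)).sum
      = ((List.range as.length).map (fun k => f (as.getD k ' ') (bs.getD k ' '))).sum
  | [], [], _ => by simp
  | [], _ :: _, h => by simp at h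
  | _ :: _, [], h => by simp at h
  | a :: as, b :: bs, h => by
    have ih := zipsum f as bs (by simpa using h)
    simp only [List.zip_cons_cons, List.map_cons, List.sum_cons, List.length_cons,
      List.range_succ_eq_map, List.map_map, Function.comp_def, Nat.succ_eq_add_one,
      List.getD_cons_succ]
    rw [ih]
    simp

-- per-other-hash contribution, against hamming_hex
lemma gLemma (cand h : String) :
    64 * (1 - (if ((cand.toList.length : Int) = (h.toList.length : Int)) then (1 : Int) else 0))
      + ((List.range cand.toList.length).map (fun (j : Nat) =>
          ((PySem.List.pyRange 0 16 1).map (fun w =>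
            (((pvKL h).count ((cand.toList.length : Int), (j : Int), w) : Int))
              * PySem.List.pyGetD ((PySem.List.pyRange 0 16 1).map pvBitCount)
                  (pvXor (pvHexVal (cand.toList.getD j ' ')) w) 0)).sum)).sum
      = hamming_hex cand h := by
  by_cases hL : (cand.toList.length : Int) = (h.toList.length : Int)
  · rw [if_pos hL]
    have hlen : h.toList.length = cand.toList.length := by omega
    have h1 : ∀ j ∈ List.range cand.toList.length,
        ((PySem.List.pyRange 0 16 1).map (fun w =>
          (((pvKL h).count ((cand.toList.length : Int), (j : Int), w) : Int))
            * PySem.List.pyGetD ((PySem.List.pyRange 0 16 1).map pvBitCount)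
                (pvXor (pvHexVal (cand.toList.getD j ' ')) w) 0)).sum
        = pvBitCount (pvXor (pvHexVal (cand.toList.getD j ' ')) (pvHexVal (h.toList.getD j ' '))) := by
      intro j hj
      have hj' : j < h.toList.length := by
        rw [hlen]; exact List.mem_range.mp hj
      rw [hL]
      rw [List.map_congr_left (g := fun w =>
        (if pvHexVal (h.toList.getD j ' ') = w then (1 : Int) else 0)
          * PySem.List.pyGetD ((PySem.List.pyRange 0 16 1).map pvBitCount)
              (pvXor (pvHexVal (cand.toList.getD j ' ')) w) 0) ?_]
      · rw [sum16_collapse _ _ (pvHexVal_bounds _).1 (pvHexVal_bounds _).2]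
        rw [pop_eval _ (pvXor_bounds (pvHexVal_bounds _) (pvHexVal_bounds _)).1
          (pvXor_bounds (pvHexVal_bounds _) (pvHexVal_bounds _)).2]
      · intro w _
        rw [count_pvKL_eq h j w hj']
        push_cast
        rfl
    rw [List.map_congr_left h1]
    unfold hamming_hex
    rw [if_neg (by omega : ¬ cand.toList.length ≠ h.toList.length)]
    show _ = (cand.toList.zip h.toList).foldl
      (fun t p => t + pvBitCount (pvXor (pvHexVal p.1) (pvHexVal p.2))) 0
    rw [PySem.List.foldl_add]
    rw [zipsum (fun ca cb => pvBitCount (pvXor (pvHexVal ca) (pvHexVal cb)))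
      cand.toList h.toList (by omega)]
    simp
  · rw [if_neg hL]
    have h1 : ∀ j ∈ List.range cand.toList.length,
        ((PySem.List.pyRange 0 16 1).map (fun w =>
          (((pvKL h).count ((cand.toList.length : Int), (j : Int), w) : Int))
            * PySem.List.pyGetD ((PySem.List.pyRange 0 16 1).map pvBitCount)
                (pvXor (pvHexVal (cand.toList.getD j ' ')) w) 0)).sum = 0 := by
      intro j _
      rw [List.map_congr_left (g := fun _ => (0 : Int)) ?_]
      · simp
      · intro w _
        rw [count_pvKL_ne h _ _ _ (fun he => hL he)]
        simp
    rw [List.map_congr_left h1]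
    unfold hamming_hex
    rw [if_pos (by omega : cand.toList.length ≠ h.toList.length)]
    simp

lemma sum2_add {A B : Type} (l1 : List A) (l2 : List B) (f g P : A → B → Int) :
    (l1.map (fun j => (l2.map (fun w => (f j w + g j w) * P j w)).sum)).sum
      = (l1.map (fun j => (l2.map (fun w => f j w * P j w)).sum)).sum
        + (l1.map (fun j => (l2.map (fun w => g j w * P j w)).sum)).sum := by
  rw [← PySem.List.sum_map_add_int]
  apply congrArg List.sum
  apply List.map_congr_left
  intro j _
  rw [← PySem.List.sum_map_add_int]
  apply congrArg List.sum
  apply List.map_congr_left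
  intro w _
  ring

-- A's inner rescan sum equals the count-table score
lemma keyLemma (cand : String) : ∀ (hs : List String),
    (hs.map (fun other => hamming_hex cand other)).sum = pvScore cand hs
  | [] => by simp [pvScore]
  | h :: hs => by
    have ih := keyLemma cand hs
    have hg := gLemma cand h
    unfold pvScore at ih ⊢
    simp only [List.map_cons, List.sum_cons, List.length_cons, List.count_cons,
      List.flatMap_cons, List.count_append, beq_iff_eq]
    push_cast
    rw [sum2_add]
    rw [ih, ← hg]
    by_cases hc : (cand.toList.length : Int) = (h.toList.length : Int)
    · rw [if_pos hc, if_pos hc.symm]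
      ring
    · rw [if_neg hc, if_neg (fun he => hc he.symm)]
      ring

lemma lenCnt_getD (hs : List String) (k : Int) :
    (hs.foldl (fun d h => d.modify (h.toList.length : Int) 0 (· + 1)) PySem.Dict.empty).getD k 0
      = ((hs.map (fun h => (h.toList.length : Int))).count k : Int) := by
  have h1 := PySem.Dict.getD_foldl_modify_add_one
    (hs.map (fun h => (h.toList.length : Int))) PySem.Dict.empty k
  rw [List.foldl_map] at h1
  rw [h1]
  simp

lemma nibCnt_getD : ∀ (hs : List String) (d : PySem.Dict (Int × Int × Int) Int)
    (k : Int × Int × Int),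
    (hs.foldl (fun d h => (PySem.List.enumerate h.toList 0).foldl
        (fun d p => d.modify ((h.toList.length : Int), p.1, pvHexVal p.2) 0 (· + 1)) d) d).getD k 0
      = d.getD k 0 + ((hs.flatMap pvKL).count k : Int)
  | [], d, k => by simp
  | h :: hs, d, k => by
    rw [List.foldl_cons, nibCnt_getD hs _ k]
    have he : (PySem.List.enumerate h.toList 0).foldl
        (fun d p => d.modify ((h.toList.length : Int), p.1, pvHexVal p.2) 0 (· + 1)) d
        = (pvKL h).foldl (fun d x => d.modify x 0 (· + 1)) d := by
      unfold pvKL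
      rw [List.foldl_map]
    rw [he, PySem.Dict.getD_foldl_modify_add_one]
    simp [List.count_append]
    ring

lemma step_eq (cand : String) (acc : String × Option Int) (s1 s2 : Int) (h : s1 = s2) :
    (match acc.2 with
      | none => (cand, some s1)
      | some bs => if s1 < bs then (cand, some s1) else acc)
    = (match acc.2 with
      | none => (cand, some s2)
      | some bs => if s2 < bs then (cand, some s2) else acc) := by
  rw [h]

theorem pv_main : ∀ (hashes : List String), medoid_hash hashes = medoid_hash_alt hashes := by
  intro hashes
  unfold medoid_hash medoid_hash_alt
  by_cases hn : hashes = []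
  · simp [hn]
  · rw [if_neg hn, if_neg hn]
    apply congrArg Prod.fst
    apply PySem.List.foldl_congr_mem
    intro acc cand hmem
    refine step_eq cand acc _ _ ?_
    rw [PySem.List.foldl_add, zero_add, keyLemma]
    simp only [nibCnt_getD, lenCnt_getD, PySem.Dict.getD_empty, zero_add,
      PySem.List.foldl_add]
    unfold pvScore
    congr 1
    rw [PySem.List.enumerate_eq_map_pyRange cand.toList ' ', List.map_map,
      PySem.List.len_eq, PySem.List.pyRange_zero_nat, List.map_map]
    apply congrArg List.sum
    apply List.map_congr_left
    intro k hk
    simp only [Function.comp, PySem.List.pyGetD_natCast]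

-- ===== VERDICT (by name: the statement is the Claim_ definition above) =====
theorem medoid_hash_spec : Claim_equal_medoid_hash := by
  intro hashes _ _
  unfold Spec_medoid_hash
  exact pv_main hashes
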